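-- pv_equiv track=rewrite | github.com/MISTLab/trap-gen | trap/decoder.py | bitStringUnion
-- ===== SOURCE A (Python) =====
-- def bitStringUnion(bitString, noCare = None):
--     """Given a list of bitstring it computes
--     their union using, as an answer, another bitstring
--     expressed with three state logic"""
--     maxLen = 0
--     for curPattern in bitString:
--         if len(curPattern) > maxLen:
--             maxLen = len(curPattern)
--     paddedbitString = []
--     for curPattern in bitString:
--         if len(curPattern) < maxLen:
--             paddedbitString.append(list(curPattern) + [None for i in range(len(curPattern), maxLen)])
--         else:
--             paddedbitString.append(curPattern)
--     validPattern = []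
--     for curPattern in paddedbitString:
--         for i in range(0, len(curPattern)):
--             if len(validPattern) > i:
--                 if validPattern[i] != curPattern[i]:
--                     validPattern[i] = noCare
--             else:
--                 validPattern.append(curPattern[i])
--     return validPattern
-- ===== SOURCE B (Python) =====
-- def bitStringUnion(bitString, noCare = None):
--     """Column-major re-implementation: transpose (with None padding) and
--     reduce each column independently."""
--     maxLen = max(map(len, bitString), default=0)
--     columns = ([p[i] if i < len(p) else None for p in bitString]
--                for i in range(maxLen))
--     return [col[0] if all(x == col[0] for x in col) else noCare
--             for col in columns]
-- ===== Notes on version B (the rewrite author's own statement) =====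
-- stated objective: simpler
-- what changed: Replaces the row-major accumulation (padding pass + mutable validPattern with append/compare/overwrite branching) by a column-major pass: transpose with None padding and emit, per column, its first element if the whole column is constant, else noCare.
import Mathlib
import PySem

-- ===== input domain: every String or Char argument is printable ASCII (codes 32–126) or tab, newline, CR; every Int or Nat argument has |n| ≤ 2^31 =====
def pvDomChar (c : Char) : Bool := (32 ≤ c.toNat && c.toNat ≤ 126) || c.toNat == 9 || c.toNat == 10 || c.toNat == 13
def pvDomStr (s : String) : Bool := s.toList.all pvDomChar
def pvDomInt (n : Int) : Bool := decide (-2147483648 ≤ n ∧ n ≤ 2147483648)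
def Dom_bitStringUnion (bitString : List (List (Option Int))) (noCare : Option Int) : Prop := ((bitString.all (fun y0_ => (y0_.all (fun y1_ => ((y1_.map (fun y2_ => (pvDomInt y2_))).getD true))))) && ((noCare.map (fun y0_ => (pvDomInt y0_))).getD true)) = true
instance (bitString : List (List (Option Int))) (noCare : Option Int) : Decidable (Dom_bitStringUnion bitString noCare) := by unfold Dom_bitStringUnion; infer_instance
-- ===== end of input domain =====

-- B changes the decomposition: A pads then folds patterns row-by-row into a mutable
-- accumulator; B computes each output position independently from its column.

-- ===== PORT A =====
-- inner `for i in range(0, len(curPattern))` loop of A, with its mutable validPattern `v`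
def pvInnerA (noCare : Option Int) (p : List (Option Int)) (i : Nat) (v : List (Option Int)) : List (Option Int) :=
  if _h : i < p.length then
    pvInnerA noCare p (i + 1)
      (if v.length > i then
        (if v.getD i none ≠ p.getD i none then v.set i noCare else v)
      else v ++ [p.getD i none])
  else v
termination_by p.length - i

def bitStringUnion (bitString : List (List (Option Int))) (noCare : Option Int) : List (Option Int) :=
  let maxLen := bitString.foldl (fun m p => if p.length > m then p.length else m) 0
  let padded := bitString.foldl
    (fun acc p => acc ++ [if p.length < maxLen then p ++ List.replicate (maxLen - p.length) (none : Option Int) else p]) []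
  padded.foldl (fun v p => pvInnerA noCare p 0 v) []

-- ===== PORT B =====
def bitStringUnion_alt (bitString : List (List (Option Int))) (noCare : Option Int) : List (Option Int) :=
  let maxLen := (bitString.map List.length).foldl max 0
  (List.range maxLen).map (fun i =>
    let col := bitString.map (fun p => if i < p.length then p.getD i none else none)
    match col with
    | [] => noCare
    | c :: _ => if col.all (fun x => x = c) then c else noCare)

-- ===== PRECONDITION & SPEC =====
def Spec_bitStringUnion (bitString : List (List (Option Int))) (noCare : Option Int) (out : List (Option Int)) : Prop := out = bitStringUnion_alt bitString noCare
instance (bitString : List (List (Option Int))) (noCare : Option Int) (out : List (Option Int)) : Decidable (Spec_bitStringUnion bitString noCare out) := by unfold Spec_bitStringUnion; infer_instance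

-- ===== CLAIM (what is proved, stated in full; the proofs are below) =====
def Claim_equal_bitStringUnion : Prop := ∀ (bitString : List (List (Option Int))) (noCare : Option Int), Dom_bitStringUnion bitString noCare → Spec_bitStringUnion bitString noCare (bitStringUnion bitString noCare)

-- ===== LEMMAS AND PROOFS =====

-- the scalar merge step applied at one position
def pvMerge (noCare a b : Option Int) : Option Int := if a ≠ b then noCare else a

lemma getD_lt {α : Type} [Inhabited α] (l : List α) (i : Nat) (d : α) (h : i < l.length) :
    l.getD i d = l[i] := by
  simp [List.getD, List.getElem?_eq_getElem h]

-- the append-building loop of accumulators (Python's paddedbitString loop) is a map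
lemma foldl_append_map {α β : Type} (g : α → β) (l : List α) (acc : List β) :
    l.foldl (fun acc p => acc ++ [g p]) acc = acc ++ l.map g := by
  induction l generalizing acc with
  | nil => simp
  | cons a l ih => simp [List.foldl_cons, ih]

-- A's maxLen fold is the max of the lengths
lemma maxLen_eq (l : List (List (Option Int))) (n : Nat) :
    l.foldl (fun m p => if p.length > m then p.length else m) n
      = l.foldl (fun m p => max m p.length) n := by
  induction l generalizing n with
  | nil => rfl
  | cons a l ih =>
    simp only [List.foldl_cons, ih]
    congr 1
    rw [Nat.max_def]; split <;> split <;> omega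

lemma le_foldl_max (l : List (List (Option Int))) (n : Nat) :
    n ≤ l.foldl (fun m p => max m p.length) n := by
  induction l generalizing n with
  | nil => simp
  | cons a l ih => exact le_trans (le_max_left _ _) (ih _)

lemma mem_le_foldl_max (l : List (List (Option Int))) (n : Nat) (p : List (Option Int))
    (hp : p ∈ l) : p.length ≤ l.foldl (fun m p => max m p.length) n := by
  induction l generalizing n with
  | nil => cases hp
  | cons a l ih =>
    rcases List.mem_cons.mp hp with h | h
    · subst h; exact le_trans (le_max_right _ _) (le_foldl_max _ _)
    · exact ih _ h

lemma take_succ_set (v : List (Option Int)) (i : Nat) (a : Option Int) (h : i < v.length) :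
    (v.set i a).take (i + 1) = v.take i ++ [a] := by
  rw [List.set_eq_take_cons_drop a h]
  rw [show i + 1 = (List.take i v).length + 1 by rw [List.length_take_of_le h.le]]
  rw [List.take_length_add_append]
  rfl

lemma drop_succ_set (v : List (Option Int)) (i : Nat) (a : Option Int) :
    (v.set i a).drop (i + 1) = v.drop (i + 1) :=
  List.drop_set_of_lt (Nat.lt_succ_self i)

-- inner loop in "append" mode: with v.length = i it appends the rest of p
lemma pvInnerA_append (noCare : Option Int) (p : List (Option Int)) :
    ∀ j i v, p.length - i = j → v.length = i → pvInnerA noCare p i v = v ++ p.drop i := by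
  intro j
  induction j with
  | zero =>
    intro i v hj hv
    rw [pvInnerA]
    have h : ¬ i < p.length := by omega
    simp [h, List.drop_eq_nil_of_le (show p.length ≤ i by omega)]
  | succ j ih =>
    intro i v hj hv
    have hi : i < p.length := by omega
    rw [pvInnerA]
    have hvi : ¬ v.length > i := by omega
    simp only [hi, dif_pos, hvi, ite_false]
    rw [ih (i + 1) (v ++ [p.getD i none]) (by omega) (by simp [hv])]
    rw [List.drop_eq_getElem_cons hi, getD_lt _ _ _ hi]
    simp

-- inner loop in "merge" mode: with v.length = p.length it zips with pvMerge
lemma pvInnerA_merge (noCare : Option Int) (p : List (Option Int)) :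
    ∀ j i v, p.length - i = j → v.length = p.length →
      pvInnerA noCare p i v = v.take i ++ List.zipWith (pvMerge noCare) (v.drop i) (p.drop i) := by
  intro j
  induction j with
  | zero =>
    intro i v hj hv
    rw [pvInnerA]
    have h : ¬ i < p.length := by omega
    simp [h, List.drop_eq_nil_of_le (show p.length ≤ i by omega),
      List.take_of_length_le (show v.length ≤ i by omega)]
  | succ j ih =>
    intro i v hj hv
    have hi : i < p.length := by omega
    have hiv : i < v.length := by omega
    rw [pvInnerA]
    have hvi : v.length > i := by omega
    simp only [hi, dif_pos, hvi, if_pos]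
    rw [List.drop_eq_getElem_cons hiv, List.drop_eq_getElem_cons hi, List.zipWith_cons_cons]
    rw [getD_lt _ _ _ hiv, getD_lt _ _ _ hi]
    by_cases h : v[i] = p[i]
    · rw [if_neg (by simp [h])]
      rw [ih (i + 1) v (by omega) hv]
      have hm : pvMerge noCare v[i] p[i] = v[i] := by simp [pvMerge, h]
      have ht : List.take (i + 1) v = List.take i v ++ [v[i]] := by
        rw [List.take_add_one, List.getElem?_eq_getElem hiv]; rfl
      rw [hm, ht, List.append_assoc]
      rfl
    · rw [if_pos (by simp [h])]
      rw [ih (i + 1) (v.set i noCare) (by omega) (by simp [hv])]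
      have hm : pvMerge noCare v[i] p[i] = noCare := by simp [pvMerge, h]
      rw [hm, take_succ_set _ _ _ hiv, drop_succ_set _ _ _, List.append_assoc]
      rfl

-- once the accumulator holds noCare at a position it stays noCare
lemma scalar_fold_absorb (noCare : Option Int) (cs : List (Option Int)) :
    cs.foldl (pvMerge noCare) noCare = noCare := by
  induction cs with
  | nil => rfl
  | cons c cs ih => simp only [List.foldl_cons, pvMerge]; split <;> exact ih

-- scalar fold over a column
lemma scalar_fold (noCare c : Option Int) (cs : List (Option Int)) :
    cs.foldl (pvMerge noCare) c = if cs.all (fun x => x = c) then c else noCare := by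
  induction cs with
  | nil => simp
  | cons b cs ih =>
    simp only [List.foldl_cons, List.all_cons]
    by_cases h : b = c
    · have h1 : pvMerge noCare c b = c := by simp [pvMerge, h]
      rw [h1, ih]
      simp [h]
    · have h1 : pvMerge noCare c b = noCare := by
        unfold pvMerge
        rw [if_pos (fun e => h (Eq.symm e))]
      rw [h1, scalar_fold_absorb]
      simp [h]

-- length and pointwise value of the outer fold over zipWith-merged rows
lemma foldl_zip_length (noCare : Option Int) (qs : List (List (Option Int))) :
    ∀ v, (qs.foldl (fun v q => List.zipWith (pvMerge noCare) v q) v).length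
      = qs.foldl (fun n q => min n q.length) v.length := by
  induction qs with
  | nil => intro v; rfl
  | cons q qs ih => intro v; simp [List.foldl_cons, ih]

lemma zipWith_getD (noCare : Option Int) (v q : List (Option Int)) (i : Nat)
    (hv : i < v.length) (hq : i < q.length) :
    (List.zipWith (pvMerge noCare) v q).getD i none = pvMerge noCare (v.getD i none) (q.getD i none) := by
  have h : i < (List.zipWith (pvMerge noCare) v q).length := by simp [List.length_zipWith]; omega
  rw [getD_lt _ _ _ h, getD_lt _ _ _ hv, getD_lt _ _ _ hq, List.getElem_zipWith]

lemma foldl_zip_getD (noCare : Option Int) (n : Nat) (qs : List (List (Option Int)))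
    (hqs : ∀ q ∈ qs, q.length = n) :
    ∀ v, v.length = n → ∀ i, i < n →
      (qs.foldl (fun v q => List.zipWith (pvMerge noCare) v q) v).getD i none
        = (qs.map (fun q => q.getD i none)).foldl (pvMerge noCare) (v.getD i none) := by
  induction qs with
  | nil => intro v _ i _; rfl
  | cons q qs ih =>
    intro v hv i hi
    have hq : q.length = n := hqs q (by simp)
    simp only [List.foldl_cons, List.map_cons]
    rw [ih (fun q hq => hqs q (by simp [hq])) _ (by simp [List.length_zipWith]; omega) i hi,
      zipWith_getD _ _ _ _ (by omega) (by omega)]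

-- a padded row has the same getD-columns as the original row
lemma pad_getD (p : List (Option Int)) (k : Nat) (i : Nat) :
    (p ++ List.replicate k (none : Option Int)).getD i none = p.getD i none := by
  unfold List.getD
  by_cases h : i < p.length
  · rw [List.getElem?_append_left h]
  · rw [List.getElem?_append_right (by omega), List.getElem?_replicate,
      List.getElem?_eq_none (show p.length ≤ i by omega)]
    split <;> rfl

lemma foldl_min_const (n : Nat) (qs : List (List (Option Int))) (h : ∀ q ∈ qs, q.length = n) :
    qs.foldl (fun m q => min m q.length) n = n := by
  induction qs with
  | nil => rfl
  | cons q qs ih =>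
    have hq : q.length = n := h q (by simp)
    simp only [List.foldl_cons, hq, Nat.min_self]
    exact ih (fun q hq => h q (by simp [hq]))

-- on rows of equal length the A-side inner loop is the zipWith merge
lemma foldl_inner_eq_zip (noCare : Option Int) (n : Nat) (qs : List (List (Option Int)))
    (hqs : ∀ q ∈ qs, q.length = n) :
    ∀ v, v.length = n →
      qs.foldl (fun v q => pvInnerA noCare q 0 v) v
        = qs.foldl (fun v q => List.zipWith (pvMerge noCare) v q) v := by
  induction qs with
  | nil => intro v _; rfl
  | cons q qs ih =>
    intro v hv
    have hq : q.length = n := hqs q (by simp)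
    simp only [List.foldl_cons]
    rw [pvInnerA_merge noCare q q.length 0 v (by omega) (by omega)]
    simp only [List.take_zero, List.drop_zero, List.nil_append]
    exact ih (fun q hq => hqs q (by simp [hq])) _ (by simp [List.length_zipWith]; omega)

lemma main_eq (bs : List (List (Option Int))) (nc : Option Int) :
    bitStringUnion bs nc = bitStringUnion_alt bs nc := by
  unfold bitStringUnion bitStringUnion_alt
  simp only [maxLen_eq, foldl_append_map, List.nil_append, List.foldl_map]
  cases bs with
  | nil => rfl
  | cons b rest =>
    have hM : ∀ p ∈ (b :: rest), p.length ≤ (b :: rest).foldl (fun m p => max m p.length) 0 :=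
      fun p hp => mem_le_foldl_max _ 0 p hp
    generalize hMdef : (b :: rest).foldl (fun m p => max m p.length) 0 = M at *
    have hget : ∀ (p : List (Option Int)) (i : Nat),
        (if p.length < M then p ++ List.replicate (M - p.length) (none : Option Int) else p).getD i none
          = p.getD i none := by
      intro p i
      split
      · exact pad_getD p (M - p.length) i
      · rfl
    have hlen : ∀ p ∈ (b :: rest),
        (if p.length < M then p ++ List.replicate (M - p.length) (none : Option Int) else p).length = M := by
      intro p hp
      have h2 := hM p hp
      split
      · simp; omega
      · omega
    have hqs : ∀ q ∈ rest.map (fun p => if p.length < M then p ++ List.replicate (M - p.length) (none : Option Int) else p), q.length = M := by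
      intro q hq
      rcases List.mem_map.mp hq with ⟨p, hp, rfl⟩
      exact hlen p (by simp [hp])
    have hq0 : (if b.length < M then b ++ List.replicate (M - b.length) (none : Option Int) else b).length = M :=
      hlen b (by simp)
    rw [List.foldl_cons]
    have hstep : pvInnerA nc (if b.length < M then b ++ List.replicate (M - b.length) (none : Option Int) else b) 0 []
        = (if b.length < M then b ++ List.replicate (M - b.length) (none : Option Int) else b) := by
      rw [pvInnerA_append nc _ _ 0 [] rfl rfl]
      simp
    have hA : List.foldl (fun x y => pvInnerA nc (if y.length < M then y ++ List.replicate (M - y.length) (none : Option Int) else y) 0 x)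
          (if b.length < M then b ++ List.replicate (M - b.length) (none : Option Int) else b) rest
        = List.foldl (fun x q => pvInnerA nc q 0 x)
            (if b.length < M then b ++ List.replicate (M - b.length) (none : Option Int) else b)
            (rest.map (fun p => if p.length < M then p ++ List.replicate (M - p.length) (none : Option Int) else p)) := by
      rw [List.foldl_map]
    rw [hstep, hA, foldl_inner_eq_zip nc M _ hqs _ hq0]
    apply List.ext_getElem
    · rw [foldl_zip_length, hq0, foldl_min_const M _ hqs]
      simp
    · intro i hi1 hi2
      have hiM : i < M := by
        have := hi1
        rw [foldl_zip_length, hq0, foldl_min_const M _ hqs] at this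
        exact this
      rw [← getD_lt _ _ _ hi1,
        foldl_zip_getD nc M _ hqs _ hq0 i hiM, List.map_map, Function.comp_def]
      have hmapeq : (fun p => (if p.length < M then p ++ List.replicate (M - p.length) (none : Option Int) else p).getD i none)
          = fun p : List (Option Int) => p.getD i none := funext fun p => hget p i
      rw [hmapeq, hget b i, scalar_fold]
      have hrange : i < (List.range M).length := by simpa using hiM
      rw [List.getElem_map, List.getElem_range]
      have hcol : (fun p : List (Option Int) => if i < p.length then p.getD i none else none)
          = fun p : List (Option Int) => p.getD i none := by
        funext p
        split
        · rfl
        · exact (List.getD_eq_default _ _ (by omega)).symm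
      rw [hcol]
      simp only [List.map_cons, List.all_cons, decide_true, Bool.true_and]

-- ===== VERDICT (by name: the statement is the Claim_ definition above) =====
theorem bitStringUnion_spec : Claim_equal_bitStringUnion := by
  intro bs nc _
  unfold Spec_bitStringUnion
  exact main_eq bs nc
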